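-- pv_equiv track=rewrite | github.com/awslabs/hybrid-model-factory | training/src/hmf/model/model_utils/allgather_sp_helper.py | get_zigzag_indices
-- ===== SOURCE A (Python) =====
-- from typing import List
--
-- def get_zigzag_indices(cp_size: int, num_chunks: int) -> List[List[int]]:
--     """
--     Create zig-zag distribution pattern for sequence chunks across GPUs.
--
--     The zig-zag pattern alternates the direction of chunk assignment across "waves"
--     where each wave assigns one chunk to each GPU. Even waves go forward (0→SP-1),
--     odd waves go backward (SP-1→0).
--
--     Args:
--         cp_size: Number of GPUs in context parallel group (SP).
--         num_chunks: Total number of chunks to distribute (NC).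
--
--     Returns:
--         List of lists where indices[gpu_id] contains the chunk IDs assigned to that GPU.
--
--     Example:
--         >>> get_zigzag_indices(cp_size=4, num_chunks=8)  # SP=4, NC=8
--         [[0, 7], [1, 6], [2, 5], [3, 4]]
--     """
--     indices = [[] for _ in range(cp_size)]
--
--     for chunk_id in range(num_chunks):
--         # Determine which "wave" we're in
--         wave = chunk_id // cp_size
--         position_in_wave = chunk_id % cp_size
--
--         # Even waves go forward (0,1,2,3), odd waves go backward (3,2,1,0)
--         if wave % 2 == 0:
--             gpu_id = position_in_wave
--         else:
--             gpu_id = cp_size - 1 - position_in_wave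
--
--         indices[gpu_id].append(chunk_id)
--
--     return indices
-- ===== SOURCE B (Python) =====
-- def get_zigzag_indices(cp_size, num_chunks):
--     """Output-driven gather: build each GPU's list directly, wave by wave."""
--     result = []
--     for gpu_id in range(cp_size):
--         row = []
--         forward = True
--         for base in range(0, num_chunks, cp_size):
--             chunk_id = base + (gpu_id if forward else cp_size - 1 - gpu_id)
--             if chunk_id < num_chunks:
--                 row.append(chunk_id)
--             forward = not forward
--         result.append(row)
--     return result
-- ===== Notes on version B (the rewrite author's own statement) =====
-- stated objective: alternative
-- what changed: Replaces A's input-driven scatter (one pass over chunk ids, computing wave/position by division and appending into a preallocated per-GPU table) by an output-driven gather that builds each GPU's row directly, stepping over wave bases with a toggled direction flag and no division.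
import Mathlib
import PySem

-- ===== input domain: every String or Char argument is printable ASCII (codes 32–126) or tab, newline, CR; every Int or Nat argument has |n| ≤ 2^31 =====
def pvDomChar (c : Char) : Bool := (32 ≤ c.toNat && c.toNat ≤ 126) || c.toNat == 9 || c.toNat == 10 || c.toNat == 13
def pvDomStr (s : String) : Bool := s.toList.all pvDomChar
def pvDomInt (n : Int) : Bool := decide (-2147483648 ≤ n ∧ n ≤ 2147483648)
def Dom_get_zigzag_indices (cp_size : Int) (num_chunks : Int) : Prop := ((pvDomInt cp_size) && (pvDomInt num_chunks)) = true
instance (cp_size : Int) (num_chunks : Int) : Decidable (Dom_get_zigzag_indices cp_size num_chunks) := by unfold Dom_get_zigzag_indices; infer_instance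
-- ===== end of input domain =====

-- B replaces A's divide-and-scatter over chunk ids by a per-GPU gather over wave
-- bases with a toggled direction flag (objective: alternative decomposition).

-- ===== PORT A =====
-- loop body of A's `for chunk_id in range(num_chunks)` (indices[gpu_id].append:
-- `.modify gpu_id.toNat` is exact since under Pre_ gpu_id is in [0, cp_size))
def gzA_step (cp_size : Int) (indices : List (List Int)) (chunk_id : Int) : List (List Int) :=
  let wave := PySem.Int.floordiv chunk_id cp_size
  let position_in_wave := PySem.Int.mod chunk_id cp_size
  let gpu_id := if PySem.Int.mod wave 2 == 0 then position_in_wave else cp_size - 1 - position_in_wave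
  indices.modify gpu_id.toNat (· ++ [chunk_id])

def get_zigzag_indices (cp_size : Int) (num_chunks : Int) : List (List Int) :=
  (PySem.List.pyRange 0 num_chunks 1).foldl (gzA_step cp_size)
    ((PySem.List.pyRange 0 cp_size 1).map (fun _ => ([] : List Int)))

-- ===== PORT B =====
-- loop body of B's inner `for base in range(0, num_chunks, cp_size)`; state = (row, forward)
def gzB_step (cp_size num_chunks gpu_id : Int) (st : List Int × Bool) (base : Int) : List Int × Bool :=
  let chunk_id := base + (if st.2 then gpu_id else cp_size - 1 - gpu_id)
  ((if chunk_id < num_chunks then st.1 ++ [chunk_id] else st.1), !st.2)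

def get_zigzag_indices_alt (cp_size : Int) (num_chunks : Int) : List (List Int) :=
  (PySem.List.pyRange 0 cp_size 1).foldl
    (fun result gpu_id =>
      result ++ [((PySem.List.pyRange 0 num_chunks cp_size).foldl
                   (gzB_step cp_size num_chunks gpu_id) ([], true)).1])
    []

-- ===== PRECONDITION & SPEC =====
-- A raises (ZeroDivisionError/IndexError) iff cp_size ≤ 0 while the chunk loop is nonempty.
def Pre_get_zigzag_indices (cp_size : Int) (num_chunks : Int) : Prop :=
  1 ≤ cp_size ∨ num_chunks ≤ 0
instance (cp_size : Int) (num_chunks : Int) : Decidable (Pre_get_zigzag_indices cp_size num_chunks) := by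
  unfold Pre_get_zigzag_indices; infer_instance

def pvWitness_get_zigzag_indices : Int × Int := (4, 8)

def Spec_get_zigzag_indices (cp_size : Int) (num_chunks : Int) (out : List (List Int)) : Prop :=
  out = get_zigzag_indices_alt cp_size num_chunks
instance (cp_size : Int) (num_chunks : Int) (out : List (List Int)) : Decidable (Spec_get_zigzag_indices cp_size num_chunks out) := by
  unfold Spec_get_zigzag_indices; infer_instance

-- ===== CLAIM (what is proved, stated in full; the proofs are below) =====
def Claim_equal_get_zigzag_indices : Prop := ∀ (cp_size : Int) (num_chunks : Int), Dom_get_zigzag_indices cp_size num_chunks → Pre_get_zigzag_indices cp_size num_chunks → Spec_get_zigzag_indices cp_size num_chunks (get_zigzag_indices cp_size num_chunks)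


-- ===== LEMMAS AND PROOFS =====

-- the gpu id A assigns to a chunk
def gz_gpu (cp c : Int) : Int :=
  if PySem.Int.mod (PySem.Int.floordiv c cp) 2 == 0 then PySem.Int.mod c cp
  else cp - 1 - PySem.Int.mod c cp

-- common zigzag-row recursion: one wave of cp chunks peeled off the front
def gzR (cp n g : Int) : List Int :=
  if h : 0 < cp ∧ 0 < n then
    (if g < n then [g] else []) ++ (gzR cp (n - cp) (cp - 1 - g)).map (· + cp)
  else []
termination_by n.toNat
decreasing_by omega

theorem gz_gpu_bounds (cp c : Int) (hcp : 0 < cp) : 0 ≤ gz_gpu cp c ∧ gz_gpu cp c < cp := by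
  have h1 := PySem.Int.mod_nonneg c hcp
  have h2 := PySem.Int.mod_lt c hcp
  unfold gz_gpu
  split <;> omega

theorem gz_gpu_small (cp c : Int) (h0 : 0 ≤ c) (h1 : c < cp) : gz_gpu cp c = c := by
  have hcp : 0 < cp := by omega
  have hd : PySem.Int.floordiv c cp = 0 := by
    rw [PySem.Int.floordiv_eq_ediv_of_pos hcp]
    exact Int.ediv_eq_zero_of_lt h0 h1
  have hm : PySem.Int.mod c cp = c := by
    rw [PySem.Int.mod_eq_emod_of_pos hcp]
    exact Int.emod_eq_of_lt h0 h1
  rw [gz_gpu, hd, hm]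
  norm_num [PySem.Int.mod]

theorem gz_gpu_add (cp c : Int) (hcp : 0 < cp) (h0 : 0 ≤ c) :
    gz_gpu cp (c + cp) = cp - 1 - gz_gpu cp c := by
  have hd : PySem.Int.floordiv (c + cp) cp = PySem.Int.floordiv c cp + 1 := by
    rw [PySem.Int.floordiv_eq_ediv_of_pos hcp, PySem.Int.floordiv_eq_ediv_of_pos hcp]
    have := Int.add_mul_ediv_right c 1 (show cp ≠ 0 by omega)
    simpa using this
  have hm : PySem.Int.mod (c + cp) cp = PySem.Int.mod c cp := by
    rw [PySem.Int.mod_eq_emod_of_pos hcp, PySem.Int.mod_eq_emod_of_pos hcp]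
    simp [Int.add_emod_right]
  have hw0 : 0 ≤ PySem.Int.floordiv c cp := by
    rw [PySem.Int.floordiv_eq_ediv_of_pos hcp]
    exact Int.ediv_nonneg h0 (by omega)
  have hp1 := PySem.Int.mod_nonneg c hcp
  have hp2 := PySem.Int.mod_lt c hcp
  have hpar : (PySem.Int.mod (PySem.Int.floordiv c cp + 1) 2 == 0)
      = !(PySem.Int.mod (PySem.Int.floordiv c cp) 2 == 0) := by
    rw [PySem.Int.mod_eq_emod_of_pos (by norm_num), PySem.Int.mod_eq_emod_of_pos (by norm_num)]
    set w := PySem.Int.floordiv c cp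
    have : w % 2 = 0 ∨ w % 2 = 1 := Int.emod_two_eq_zero_or_one w
    rcases this with h | h <;> simp [Int.add_emod, h]
  unfold gz_gpu
  rw [hd, hm, hpar]
  cases h : (PySem.Int.mod (PySem.Int.floordiv c cp) 2 == 0) <;> simp [h] <;> omega

-- ---- A side: the fold scatters each chunk into row (gz_gpu cp c) ----

theorem gzA_step_eq (cp : Int) (acc : List (List Int)) (c : Int) :
    gzA_step cp acc c = acc.modify (gz_gpu cp c).toNat (· ++ [c]) := by
  simp only [gzA_step, gz_gpu]

theorem gzA_fold_length (cp : Int) (L : List Int) (acc : List (List Int)) :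
    (L.foldl (gzA_step cp) acc).length = acc.length := by
  induction L generalizing acc with
  | nil => rfl
  | cons c L ih => simp [List.foldl_cons, ih, gzA_step_eq]

theorem gzA_fold_get (cp : Int) (L : List Int) (acc : List (List Int)) (i : Nat)
    (hi : i < acc.length) (hnn : ∀ c ∈ L, 0 ≤ gz_gpu cp c) :
    (L.foldl (gzA_step cp) acc)[i]?
      = some (acc[i] ++ L.filter (fun c => gz_gpu cp c == (i : Int))) := by
  induction L generalizing acc with
  | nil => simp [List.getElem?_eq_getElem hi]
  | cons c L ih =>
    have hc : 0 ≤ gz_gpu cp c := hnn c (List.mem_cons_self)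
    have hrest : ∀ x ∈ L, 0 ≤ gz_gpu cp x := fun x hx => hnn x (List.mem_cons_of_mem _ hx)
    rw [List.foldl_cons, gzA_step_eq,
        ih (acc.modify (gz_gpu cp c).toNat (· ++ [c])) (by simpa using hi) hrest]
    rw [List.getElem_modify]
    by_cases heq : gz_gpu cp c = (i : Int)
    · have : (gz_gpu cp c).toNat = i := by omega
      simp [this, heq, List.filter_cons]
    · have : (gz_gpu cp c).toNat ≠ i := by omega
      simp [this, heq, List.filter_cons]

-- ---- B side: the inner fold computes `contrib`, which equals gzR ----

def gzContrib (cp n g : Int) : Bool → List Int → List Int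
  | _, [] => []
  | fwd, b :: bs =>
    (if b + (if fwd then g else cp - 1 - g) < n then [b + (if fwd then g else cp - 1 - g)] else [])
      ++ gzContrib cp n g (!fwd) bs

theorem gzB_fold_eq_contrib (cp n g : Int) (l : List Int) (acc : List Int) (fwd : Bool) :
    (l.foldl (gzB_step cp n g) (acc, fwd)).1 = acc ++ gzContrib cp n g fwd l := by
  induction l generalizing acc fwd with
  | nil => simp [gzContrib]
  | cons b bs ih =>
    rw [List.foldl_cons]
    have hstep : gzB_step cp n g (acc, fwd) b
        = ((if b + (if fwd then g else cp - 1 - g) < n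
              then acc ++ [b + (if fwd then g else cp - 1 - g)] else acc), !fwd) := rfl
    rw [hstep, ih]
    show _ = acc ++ ((if b + (if fwd then g else cp - 1 - g) < n
        then [b + (if fwd then g else cp - 1 - g)] else []) ++ gzContrib cp n g (!fwd) bs)
    split <;> split <;> simp

theorem gzContrib_flip (cp n g : Int) (l : List Int) (fwd : Bool) :
    gzContrib cp n g fwd l = gzContrib cp n (cp - 1 - g) (!fwd) l := by
  induction l generalizing g fwd with
  | nil => simp [gzContrib]
  | cons b bs ih =>
    unfold gzContrib
    have hoff : (if fwd then g else cp - 1 - g)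
        = (if !fwd then cp - 1 - g else cp - 1 - (cp - 1 - g)) := by
      cases fwd <;> simp <;> omega
    rw [hoff, ih g (!fwd), Bool.not_not]

theorem gzContrib_shift (cp n g : Int) (l : List Int) (fwd : Bool) :
    gzContrib cp n g fwd (l.map (· + cp)) = (gzContrib cp (n - cp) g fwd l).map (· + cp) := by
  induction l generalizing fwd with
  | nil => simp [gzContrib]
  | cons b bs ih =>
    simp only [List.map_cons]
    unfold gzContrib
    rw [ih (!fwd), List.map_append]
    congr 1
    rw [show b + cp + (if fwd then g else cp - 1 - g)
          = (b + (if fwd then g else cp - 1 - g)) + cp by ring]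
    simp only [show ((b + (if fwd then g else cp - 1 - g)) + cp < n)
          ↔ ((b + (if fwd then g else cp - 1 - g)) < n - cp) from by omega]
    by_cases hc : (b + (if fwd then g else cp - 1 - g)) < n - cp
    · rw [if_pos hc, if_pos hc]
      simp
    · rw [if_neg hc, if_neg hc]
      rfl

theorem gzPyRange_step_cons (cp n : Int) (hcp : 0 < cp) (hn : 0 < n) :
    PySem.List.pyRange 0 n cp = 0 :: (PySem.List.pyRange 0 (n - cp) cp).map (· + cp) := by
  rw [PySem.List.pyRange_of_pos _ _ hcp, PySem.List.pyRange_of_pos _ _ hcp]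
  rw [if_pos (show (0:Int) < n by omega)]
  have hcount : ((n - 0 + cp - 1) / cp).toNat
      = (if 0 < n - cp then ((n - cp - 0 + cp - 1) / cp).toNat else 0) + 1 := by
    by_cases h : 0 < n - cp
    · rw [if_pos h]
      have h2 : (n - 0 + cp - 1) / cp = (n - cp - 0 + cp - 1) / cp + 1 := by
        rw [show n - 0 + cp - 1 = (n - cp - 0 + cp - 1) + 1 * cp by ring,
            Int.add_mul_ediv_right _ _ (show cp ≠ 0 by omega)]
      have hpos : 0 ≤ (n - cp - 0 + cp - 1) / cp := Int.ediv_nonneg (by omega) (by omega)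
      omega
    · rw [if_neg h]
      have h2 : (n - 0 + cp - 1) / cp = 1 := by
        rw [show n - 0 + cp - 1 = (n - 1) + 1 * cp by ring,
            Int.add_mul_ediv_right _ _ (show cp ≠ 0 by omega),
            Int.ediv_eq_zero_of_lt (by omega) (by omega)]
        norm_num
      omega
  rw [hcount, List.range_succ_eq_map]
  simp only [List.map_cons, List.map_map]
  congr 1
  · simp
  · apply List.map_congr_left
    intro k _
    simp only [Function.comp_apply]
    push_cast
    ring

theorem gzContrib_eq_R (cp : Int) (hcp : 0 < cp) :
    ∀ (m : Nat) (n g : Int), n.toNat ≤ m → 0 ≤ g → g < cp →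
      gzContrib cp n g true (PySem.List.pyRange 0 n cp) = gzR cp n g := by
  intro m
  induction m with
  | zero =>
    intro n g hm h0 h1
    have hn : n ≤ 0 := by omega
    rw [PySem.List.pyRange_of_pos _ _ hcp]
    rw [if_neg (by omega)]
    simp [gzContrib, gzR, show ¬(0 < cp ∧ 0 < n) from by omega]
  | succ m ih =>
    intro n g hm h0 h1
    by_cases hn : 0 < n
    · rw [gzPyRange_step_cons cp n hcp hn]
      unfold gzContrib
      rw [gzContrib_flip, gzContrib_shift]
      rw [show (!!true) = true from rfl]
      rw [ih (n - cp) (cp - 1 - g) (by omega) (by omega) (by omega)]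
      conv_rhs => rw [gzR]
      rw [dif_pos ⟨hcp, hn⟩]
      simp
    · rw [PySem.List.pyRange_of_pos _ _ hcp, if_neg (by omega)]
      simp [gzContrib, gzR, show ¬(0 < cp ∧ 0 < n) from by omega]

-- ---- A's filtered rows satisfy the same recursion ----

theorem nat_range_filter (M K : Nat) :
    (List.range M).filter (fun k => k == K) = if K < M then [K] else [] := by
  induction M with
  | zero => simp
  | succ M ih =>
    rw [List.range_succ, List.filter_append, ih]
    by_cases h : K < M
    · simp [h, show K < M + 1 by omega, show (M == K) = false by simp; omega]
    · by_cases h2 : K = M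
      · simp [h, h2]
      · simp [h, show ¬ K < M + 1 by omega, show (M == K) = false by simp; omega]

theorem gz_filter_range_singleton (m g : Int) (h0 : 0 ≤ g) :
    (PySem.List.pyRange 0 m 1).filter (fun c => c == g) = if g < m then [g] else [] := by
  rw [PySem.List.pyRange_one, List.filter_map]
  rw [List.filter_congr (fun (k : Nat) _ => show ((fun c => c == g) ∘ fun k : Nat => (0:Int) + ↑k) k = (k == g.toNat) by simp; omega)]
  rw [nat_range_filter]
  by_cases hg : g < m
  · rw [if_pos (by omega), if_pos hg]
    simp [Int.toNat_of_nonneg h0]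
  · rw [if_neg (by omega), if_neg hg]
    rfl

theorem gzFilter_eq_R (cp : Int) (hcp : 0 < cp) :
    ∀ (m : Nat) (n g : Int), n.toNat ≤ m → 0 ≤ g → g < cp →
      (PySem.List.pyRange 0 n 1).filter (fun c => gz_gpu cp c == g) = gzR cp n g := by
  intro m
  induction m with
  | zero =>
    intro n g hm h0 h1
    rw [PySem.List.pyRange_one_eq_nil (by omega)]
    simp [gzR, show ¬(0 < cp ∧ 0 < n) from by omega]
  | succ m ih =>
    intro n g hm h0 h1
    by_cases hn : 0 < n
    · rw [PySem.List.pyRange_one_append 0 (min cp n) n (by omega) (by omega), List.filter_append]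
      have hfirst : (PySem.List.pyRange 0 (min cp n) 1).filter (fun c => gz_gpu cp c == g)
          = if g < n then [g] else [] := by
        have hcg : ∀ c ∈ PySem.List.pyRange 0 (min cp n) 1,
            (gz_gpu cp c == g) = (c == g) := by
          intro c hc
          rw [PySem.List.mem_pyRange_one] at hc
          rw [gz_gpu_small cp c hc.1 (by omega)]
        rw [List.filter_congr hcg, gz_filter_range_singleton _ _ h0]
        by_cases hgn : g < n
        · rw [if_pos (by omega), if_pos hgn]
        · rw [if_neg (by omega), if_neg hgn]
      have hsecond : (PySem.List.pyRange (min cp n) n 1).filter (fun c => gz_gpu cp c == g)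
          = (gzR cp (n - cp) (cp - 1 - g)).map (· + cp) := by
        by_cases hle : n ≤ cp
        · rw [show min cp n = n by omega, PySem.List.pyRange_one_eq_nil (by omega)]
          rw [show gzR cp (n - cp) (cp - 1 - g) = [] from by
            rw [gzR]; rw [dif_neg (by omega)]]
          rfl
        · rw [show min cp n = cp by omega]
          have hshift : PySem.List.pyRange cp n 1 = (PySem.List.pyRange 0 (n - cp) 1).map (· + cp) := by
            rw [PySem.List.pyRange_one, PySem.List.pyRange_one, List.map_map]
            rw [show n - cp - 0 = n - cp by ring]
            apply List.map_congr_left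
            intro k _
            simp only [Function.comp_apply]
            ring
          rw [hshift, List.filter_map]
          have hpred : ∀ c ∈ PySem.List.pyRange 0 (n - cp) 1,
              ((fun c => gz_gpu cp c == g) ∘ (· + cp)) c = (gz_gpu cp c == cp - 1 - g) := by
            intro c hc
            rw [PySem.List.mem_pyRange_one] at hc
            simp only [Function.comp_apply, gz_gpu_add cp c hcp hc.1]
            exact Bool.eq_iff_iff.mpr (by simp only [beq_iff_eq]; omega)
          rw [List.filter_congr hpred]
          rw [ih (n - cp) (cp - 1 - g) (by omega) (by omega) (by omega)]
      rw [hfirst, hsecond]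
      conv_rhs => rw [gzR]
      rw [dif_pos ⟨hcp, hn⟩]
    · rw [PySem.List.pyRange_one_eq_nil (by omega)]
      simp [gzR, show ¬(0 < cp ∧ 0 < n) from by omega]

-- ===== VERDICT (by name: the statement is the Claim_ definition above) =====
theorem get_zigzag_indices_spec : Claim_equal_get_zigzag_indices := by
  intro cp n _ hpre
  show get_zigzag_indices cp n = get_zigzag_indices_alt cp n
  unfold get_zigzag_indices get_zigzag_indices_alt
  rw [PySem.List.foldl_append_singleton_eq_map
        (fun g => ((PySem.List.pyRange 0 n cp).foldl (gzB_step cp n g) ([], true)).1)]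
  simp only [List.nil_append]
  by_cases hcp : 0 < cp
  · apply List.ext_getElem
    · rw [gzA_fold_length, List.length_map, List.length_map]
    · intro i h1 h2
      have hlen : ((PySem.List.pyRange 0 cp 1).map (fun _ => ([] : List Int))).length = (cp).toNat := by
        simp [PySem.List.length_pyRange_one]
      have hi : i < ((PySem.List.pyRange 0 cp 1).map (fun _ => ([] : List Int))).length := by
        rw [gzA_fold_length] at h1; exact h1
      have hicp : i < cp.toNat := by rw [hlen] at hi; exact hi
      have hget := gzA_fold_get cp (PySem.List.pyRange 0 n 1) _ i hi (fun c hc => by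
        rw [PySem.List.mem_pyRange_one] at hc
        exact (gz_gpu_bounds cp c hcp).1)
      rw [List.getElem?_eq_getElem h1] at hget
      rw [Option.some_inj.mp hget]
      have hg : (PySem.List.pyRange 0 cp 1)[i]'(by simp [PySem.List.length_pyRange_one]; omega)
          = (i : Int) := by
        rw [PySem.List.getElem_pyRange_one]; ring
      rw [List.getElem_map, List.getElem_map, hg]
      simp only [List.nil_append]
      rw [gzB_fold_eq_contrib, List.nil_append]
      rw [gzContrib_eq_R cp hcp n.toNat n (i : Int) (le_refl _) (by omega) (by omega)]
      rw [gzFilter_eq_R cp hcp n.toNat n (i : Int) (le_refl _) (by omega) (by omega)]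
  · -- cp ≤ 0 (so, by Pre_, n ≤ 0 too): both sides are the empty list
    rw [PySem.List.pyRange_one_eq_nil (show cp ≤ 0 by omega)]
    have hn : n ≤ 0 := by rcases hpre with h | h <;> omega
    rw [PySem.List.pyRange_one_eq_nil (show n ≤ 0 by omega)]
    simp
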